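-- pv_equiv track=rewrite | github.com/ilkka-torma/gol-agars | pattern_basics.py | ext_per_left
-- ===== SOURCE A (Python) =====
-- def ext_per_left(lis, pad):
--     cur = len(lis)-1
--     ret = []
--     for i in range(pad):
--         ret.append(lis[cur])
--         cur -= 1
--         cur %= len(lis)
--     return list(reversed(ret))
-- ===== SOURCE B (Python) =====
-- def ext_per_left(lis, pad):
--     if pad <= 0:
--         return []
--     reps = pad // len(lis) + 1
--     tiled = lis * reps
--     return tiled[len(tiled) - pad:]
-- ===== Notes on version B (the rewrite author's own statement) =====
-- stated objective: simpler
-- what changed: B replaces the per-element backward loop with modular index stepping by tiling the list pad//len+1 times and taking the trailing pad-element slice.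
import Mathlib
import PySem

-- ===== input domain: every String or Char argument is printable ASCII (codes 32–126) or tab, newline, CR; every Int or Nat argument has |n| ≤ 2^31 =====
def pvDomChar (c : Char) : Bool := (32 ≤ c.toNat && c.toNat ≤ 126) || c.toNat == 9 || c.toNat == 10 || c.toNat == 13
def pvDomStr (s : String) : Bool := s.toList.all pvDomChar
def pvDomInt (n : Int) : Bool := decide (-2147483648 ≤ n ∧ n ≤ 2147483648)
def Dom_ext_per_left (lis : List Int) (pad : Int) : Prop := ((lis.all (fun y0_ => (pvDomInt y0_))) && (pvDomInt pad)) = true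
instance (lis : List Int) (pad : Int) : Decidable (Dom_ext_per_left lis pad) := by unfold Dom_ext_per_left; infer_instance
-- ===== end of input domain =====

-- B replaces A's per-element backward loop with modular stepping by a tiled copy of the
-- list and one trailing slice (objective: simpler).

-- ===== PORT A =====
-- one loop iteration: ret.append(lis[cur]); cur -= 1; cur %= len(lis)
def extStepA (lis : List Int) (s : Int × List Int) (_ : Int) : Int × List Int :=
  (PySem.Int.mod (s.1 - 1) (lis.length : Int), s.2 ++ [PySem.List.pyGetD lis s.1 0])

def ext_per_left (lis : List Int) (pad : Int) : List Int :=
  (((PySem.List.pyRange 0 pad 1).foldl (extStepA lis) ((lis.length : Int) - 1, [])).2).reverse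

-- ===== PORT B =====
-- tiled[len(tiled) - pad:]
def extTailSlice (tiled : List Int) (pad : Int) : List Int :=
  PySem.List.slice tiled (some ((tiled.length : Int) - pad)) none

def ext_per_left_alt (lis : List Int) (pad : Int) : List Int :=
  if pad ≤ 0 then []
  else
    -- reps = pad // len(lis) + 1; tiled = lis * reps; return tiled[len(tiled) - pad:]
    extTailSlice ((List.replicate (PySem.Int.floordiv pad (lis.length : Int) + 1).toNat lis).flatten) pad

-- ===== PRECONDITION & SPEC =====
-- Pre_ excludes exactly the inputs where A raises: empty lis with pad > 0
-- (A: IndexError on lis[cur]; B raises there too, ZeroDivisionError on pad // len(lis)).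
def Pre_ext_per_left (lis : List Int) (pad : Int) : Prop := lis ≠ [] ∨ pad ≤ 0
instance (lis : List Int) (pad : Int) : Decidable (Pre_ext_per_left lis pad) := by
  unfold Pre_ext_per_left; infer_instance
def pvWitness_ext_per_left : List Int × Int := ([1, 2, 3], 5)

def Spec_ext_per_left (lis : List Int) (pad : Int) (out : List Int) : Prop := out = ext_per_left_alt lis pad
instance (lis : List Int) (pad : Int) (out : List Int) : Decidable (Spec_ext_per_left lis pad out) := by unfold Spec_ext_per_left; infer_instance

-- ===== CLAIM (what is proved, stated in full; the proofs are below) =====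
def Claim_equal_ext_per_left : Prop := ∀ (lis : List Int) (pad : Int), Dom_ext_per_left lis pad → Pre_ext_per_left lis pad → Spec_ext_per_left lis pad (ext_per_left lis pad)

-- ===== LEMMAS AND PROOFS =====

-- shifting the dividend by a prior % does not change the %
theorem emod_sub_emod (a t n : Int) : (a % n - t) % n = (a - t) % n := by
  rw [Int.sub_emod, Int.emod_emod_of_dvd a dvd_rfl, ← Int.sub_emod]

-- invariant of A's loop: after folding any list l from a reduced counter c,
-- ret is acc extended with the elements lis[(c - t) mod n] for t = 0 .. |l|-1
theorem foldA_snd (lis : List Int) (l : List Int) (c : Int) (acc : List Int)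
    (hn : 0 < (lis.length : Int)) (hc0 : 0 ≤ c) (hcn : c < (lis.length : Int)) :
    (l.foldl (extStepA lis) (c, acc)).2 =
      acc ++ (List.range l.length).map
        (fun (t : Nat) => PySem.List.pyGetD lis (((c - (t : Int)) % (lis.length : Int) : Int)) 0) := by
  induction l generalizing c acc with
  | nil => simp
  | cons x xs ih =>
    have hstep : extStepA lis (c, acc) x =
        ((c - 1) % (lis.length : Int), acc ++ [PySem.List.pyGetD lis c 0]) := by
      simp [extStepA, PySem.Int.mod_eq_emod_of_pos hn]
    rw [List.foldl_cons, hstep,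
      ih ((c - 1) % (lis.length : Int)) _ (Int.emod_nonneg _ (by omega))
        (Int.emod_lt_of_pos _ hn)]
    rw [List.length_cons, List.range_succ_eq_map, List.map_cons, List.map_map]
    have h0 : PySem.List.pyGetD lis ((c - ((0 : Nat) : Int)) % (lis.length : Int)) 0 =
        PySem.List.pyGetD lis c 0 := by
      norm_num [Int.emod_eq_of_lt hc0 hcn]
    rw [← h0]
    simp only [List.append_assoc, List.singleton_append]
    congr 2
    apply List.map_congr_left
    intro t _
    simp only [Function.comp]
    rw [emod_sub_emod]
    congr 2
    push_cast
    ring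

-- the flattened tiling reads the list cyclically
theorem flatten_replicate_getElem (lis : List Int) (r j : Nat)
    (hn : 0 < lis.length) (hj : j < ((List.replicate r lis).flatten).length) :
    ((List.replicate r lis).flatten)[j] = lis[j % lis.length]'(Nat.mod_lt _ hn) := by
  induction r generalizing j with
  | zero => simp at hj
  | succ r ih =>
    simp only [List.replicate_succ, List.flatten_cons] at hj ⊢
    by_cases h : j < lis.length
    · rw [List.getElem_append_left h]
      simp only [Nat.mod_eq_of_lt h]
    · have hj' : j - lis.length < ((List.replicate r lis).flatten).length := by
        simp only [List.length_append] at hj; omega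
      rw [List.getElem_append_right (by omega), ih (j - lis.length) hj']
      have hidx : (j - lis.length) % lis.length = j % lis.length := by
        conv_rhs => rw [show j = lis.length + (j - lis.length) from by omega]
        rw [Nat.add_mod_left]
      simp only [hidx]

theorem flatten_replicate_length (lis : List Int) (r : Nat) :
    ((List.replicate r lis).flatten).length = r * lis.length := by
  induction r with
  | zero => simp
  | succ r ih => rw [List.replicate_succ, List.flatten_cons, List.length_append, ih]; ring

theorem ext_per_left_eq (lis : List Int) (pad : Int) (h : Pre_ext_per_left lis pad) :
    ext_per_left lis pad = ext_per_left_alt lis pad := by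
  by_cases hp : pad ≤ 0
  · simp [ext_per_left, ext_per_left_alt, hp, PySem.List.pyRange_one_eq_nil hp]
  · have hlis : lis ≠ [] := h.resolve_right hp
    have hn : 0 < lis.length := List.length_pos_iff.mpr hlis
    have hnI : 0 < (lis.length : Int) := by exact_mod_cast hn
    have hpad : 0 < pad := by omega
    set p : Nat := pad.toNat with hpdef
    have hpcast : (p : Int) = pad := Int.toNat_of_nonneg (by omega)
    have hA : ext_per_left lis pad =
        ((List.range p).map
          (fun (t : Nat) => PySem.List.pyGetD lis
            ((((lis.length : Int) - 1 - (t : Int)) % (lis.length : Int) : Int)) 0)).reverse := by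
      unfold ext_per_left
      rw [foldA_snd lis _ _ _ hnI (by omega) (by omega)]
      rw [PySem.List.length_pyRange_one]
      simp only [List.nil_append, sub_zero, ← hpdef]
    have hdiv := Int.emod_add_mul_ediv pad (lis.length : Int)
    have hmodlt := Int.emod_lt_of_pos pad hnI
    have hmodge := Int.emod_nonneg pad (by omega : (lis.length : Int) ≠ 0)
    have hdivge : 0 ≤ pad / (lis.length : Int) := Int.ediv_nonneg (by omega) (by omega)
    set r : Nat := (PySem.Int.floordiv pad (lis.length : Int) + 1).toNat with hrdef
    have hfd : PySem.Int.floordiv pad (lis.length : Int) = pad / (lis.length : Int) :=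
      PySem.Int.floordiv_eq_ediv_of_pos hnI
    have hrcast : (r : Int) = pad / (lis.length : Int) + 1 := by
      rw [hrdef, hfd]; exact Int.toNat_of_nonneg (by omega)
    have hLen : ((List.replicate r lis).flatten).length = r * lis.length :=
      flatten_replicate_length lis r
    have hpL : p ≤ r * lis.length := by
      have h1 : (p : Int) < (r : Int) * (lis.length : Int) := by
        rw [hpcast, hrcast]; nlinarith
      have h2 : (p : Int) < ((r * lis.length : Nat) : Int) := by push_cast; exact h1
      omega
    have hB : ext_per_left_alt lis pad =
        ((List.replicate r lis).flatten).drop (r * lis.length - p) := by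
      have h0 : (0 : Int) ≤ ((r * lis.length : Nat) : Int) - pad := by push_cast; omega
      unfold ext_per_left_alt extTailSlice
      rw [if_neg hp, ← hrdef, hLen]
      rw [PySem.List.slice_from _ h0]
      congr 1
      omega
    rw [hA, hB]
    apply List.ext_getElem
    · simp only [List.length_reverse, List.length_map, List.length_range, List.length_drop, hLen]
      omega
    · intro i h1 h2
      simp only [List.length_reverse, List.length_map, List.length_range] at h1
      rw [List.getElem_reverse, List.getElem_drop]
      simp only [List.length_map, List.length_range]
      rw [List.getElem_map, List.getElem_range]
      rw [flatten_replicate_getElem lis r _ hn (by rw [hLen]; omega)]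
      have e0 : 0 ≤ ((lis.length : Int) - 1 - ((p - 1 - i : Nat) : Int)) % (lis.length : Int) :=
        Int.emod_nonneg _ (by omega)
      have e1 : ((lis.length : Int) - 1 - ((p - 1 - i : Nat) : Int)) % (lis.length : Int) <
          (lis.length : Int) := Int.emod_lt_of_pos _ hnI
      rw [PySem.List.pyGetD_eq_getElem lis 0 e0 e1]
      have hc : ((p - 1 - i : Nat) : Int) = (p : Int) - 1 - (i : Int) := by
        have h1i : 1 + i ≤ p := by omega
        omega
      have key : ((lis.length : Int) - 1 - ((p - 1 - i : Nat) : Int)) % (lis.length : Int) =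
          (((r * lis.length - p + i) % lis.length : Nat) : Int) := by
        rw [hc, Int.natCast_mod]
        have hL : ((r * lis.length - p + i : Nat) : Int) =
            (r : Int) * (lis.length : Int) - (p : Int) + (i : Int) := by
          push_cast [Nat.cast_sub hpL]
          ring
        rw [hL]
        have hsplit : (r : Int) * (lis.length : Int) - (p : Int) + (i : Int) =
            ((lis.length : Int) - 1 - ((p : Int) - 1 - (i : Int))) +
              (lis.length : Int) * ((r : Int) - 1) := by ring
        rw [hsplit, Int.add_mul_emod_self_left]
      have htn : (((lis.length : Int) - 1 - ((p - 1 - i : Nat) : Int)) % (lis.length : Int)).toNat =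
          (r * lis.length - p + i) % lis.length := by omega
      simp only [htn]

-- ===== VERDICT (by name: the statement is the Claim_ definition above) =====
theorem ext_per_left_spec : Claim_equal_ext_per_left := by
  intro lis pad _ hpre
  exact ext_per_left_eq lis pad hpre
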